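-- pv_equiv track=rewrite | github.com/Gpie5987/Poker | PokerHand.py | _sortForcompare
-- ===== SOURCE A (Python) =====
-- def _sortForcompare(count_rst):
--     num_amount = [[], [], [], []]
--     for i,amt in enumerate(count_rst[1]):
--         num_amount[amt-1].append(count_rst[0][i])
--     re = []
--     for element in num_amount:
--         if element != []:
--             re = re + element
--     re.reverse()
--     return re
-- ===== SOURCE B (Python) =====
-- def _sortForcompare(count_rst):
--     values, counts = count_rst[0], count_rst[1]
--     order = sorted(range(len(counts)), key=lambda i: (counts[i], i), reverse=True)
--     return [values[i] for i in order]
-- ===== Notes on version B (the rewrite author's own statement) =====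
-- stated objective: idiomatic
-- what changed: Replaces the distribute-into-four-buckets-then-concatenate-then-reverse pass with one descending comparison sort of the indices keyed by (count, index); Pre_ excludes count rows that pair a positive count with a nonpositive count no more than 4 below it, where the relative ranking of the two values is unspecified (counts outside 1..4 cannot arise from counting a hand) and A's negative-list-indexed bucket order and B's count order disagree.
-- outside the precondition, e.g. on _sortForcompare([[7, 8], [1, 0]]): A returns [8, 7], B returns [7, 8]
import Mathlib
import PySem

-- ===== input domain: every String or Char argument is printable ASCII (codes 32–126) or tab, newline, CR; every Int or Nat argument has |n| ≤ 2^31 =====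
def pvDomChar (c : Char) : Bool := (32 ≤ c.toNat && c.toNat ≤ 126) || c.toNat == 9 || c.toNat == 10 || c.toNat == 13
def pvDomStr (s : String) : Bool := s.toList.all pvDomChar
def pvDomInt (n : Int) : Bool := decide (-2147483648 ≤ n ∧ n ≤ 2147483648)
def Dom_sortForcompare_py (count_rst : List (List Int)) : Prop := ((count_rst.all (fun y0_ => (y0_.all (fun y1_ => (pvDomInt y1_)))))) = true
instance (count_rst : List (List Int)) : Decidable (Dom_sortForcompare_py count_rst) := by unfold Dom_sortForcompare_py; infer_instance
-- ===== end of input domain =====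

-- B replaces A's four-bucket distribute/concatenate/reverse with one descending sort of the
-- indices keyed by (count, index); objective: idiomatic. Equal on every input Pre_ admits.

-- ===== PORT A =====
def sortForcompare_py (count_rst : List (List Int)) : List Int :=
  let cnts := (PySem.List.pyGet? count_rst 1).getD []
  let vals := (PySem.List.pyGet? count_rst 0).getD []
  -- for i,amt in enumerate(count_rst[1]): num_amount[amt-1].append(count_rst[0][i])
  -- (.append is a read-modify-write of the selected bucket; any out-of-range index raises
  --  in Python and is excluded by Pre_, so the getD defaults are never the value there)
  let num_amount := (PySem.List.enumerate cnts).foldl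
    (fun (bs : List (List Int)) (p : Int × Int) =>
      PySem.List.pySetD bs (p.2 - 1)
        (PySem.List.pyGetD bs (p.2 - 1) [] ++ [PySem.List.pyGetD vals p.1 0]))
    [[], [], [], []]
  -- re = []; for element in num_amount: if element != []: re = re + element
  let re := num_amount.foldl (fun re e => if e ≠ [] then re ++ e else re) []
  re.reverse

-- ===== PORT B =====
def sortForcompare_py_alt (count_rst : List (List Int)) : List Int :=
  let values := (PySem.List.pyGet? count_rst 0).getD []
  let counts := (PySem.List.pyGet? count_rst 1).getD []
  let order := PySem.List.sorted2 (PySem.List.pyRange 0 (PySem.List.len counts) 1)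
      (fun i => PySem.List.pyGetD counts i 0)
      (fun i => i) true
  order.map (fun i => PySem.List.pyGetD values i 0)

-- ===== PRECONDITION & SPEC =====
-- Pre_ admits the inputs on which A returns (both rows present, the value row covering every
-- counted index, every count in -3..4 — outside that range num_amount[amt-1] is an IndexError)
-- EXCEPT the count rows pairing a positive count with a nonpositive count no more than 4 below
-- it: counts outside 1..4 cannot arise from counting a hand, and on such rows the relative
-- ranking of the two values is unspecified — A ranks the nonpositive count through Python's
-- negative list indexing, B ranks it below every positive count.
def Pre_sortForcompare_py (count_rst : List (List Int)) : Prop :=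
  2 ≤ count_rst.length ∧
  (count_rst.getD 1 []).length ≤ (count_rst.getD 0 []).length ∧
  (∀ c ∈ count_rst.getD 1 [], -3 ≤ c ∧ c ≤ 4) ∧
  ¬ ∃ c ∈ count_rst.getD 1 [], ∃ c' ∈ count_rst.getD 1 [], 1 ≤ c ∧ c' ≤ 0 ∧ c ≤ c' + 4
instance (count_rst : List (List Int)) : Decidable (Pre_sortForcompare_py count_rst) := by unfold Pre_sortForcompare_py; infer_instance
def pvWitness_sortForcompare_py : List (List Int) := [[14, 5, 9], [2, 1, 2]]

def Spec_sortForcompare_py (count_rst : List (List Int)) (out : List Int) : Prop := out = sortForcompare_py_alt count_rst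
instance (count_rst : List (List Int)) (out : List Int) : Decidable (Spec_sortForcompare_py count_rst out) := by unfold Spec_sortForcompare_py; infer_instance

-- ===== CLAIM (what is proved, stated in full; the proofs are below) =====
def Claim_equal_sortForcompare_py : Prop := ∀ (count_rst : List (List Int)), Dom_sortForcompare_py count_rst → Pre_sortForcompare_py count_rst → Spec_sortForcompare_py count_rst (sortForcompare_py count_rst)

-- ===== LEMMAS AND PROOFS =====

-- the bucket a count c lands in: A's 4-list index amt-1 as Python resolves it
def pvKey (c : Int) : Int := PySem.Int.mod (c - 1) 4

-- A's bucket loop, made explicit: each entry is appended to the bucket pvKey selects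
theorem pv_buckets (vals : List Int) (cnts : List Int) (s : Int)
    (b0 b1 b2 b3 : List Int) (hc : ∀ c ∈ cnts, -3 ≤ c ∧ c ≤ 4) :
    (PySem.List.enumerate cnts s).foldl
      (fun (bs : List (List Int)) (p : Int × Int) =>
        PySem.List.pySetD bs (p.2 - 1)
          (PySem.List.pyGetD bs (p.2 - 1) [] ++ [PySem.List.pyGetD vals p.1 0]))
      [b0, b1, b2, b3]
    = [b0 ++ ((PySem.List.enumerate cnts s).filter (fun p => pvKey p.2 == 0)).map (fun p => PySem.List.pyGetD vals p.1 0),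
       b1 ++ ((PySem.List.enumerate cnts s).filter (fun p => pvKey p.2 == 1)).map (fun p => PySem.List.pyGetD vals p.1 0),
       b2 ++ ((PySem.List.enumerate cnts s).filter (fun p => pvKey p.2 == 2)).map (fun p => PySem.List.pyGetD vals p.1 0),
       b3 ++ ((PySem.List.enumerate cnts s).filter (fun p => pvKey p.2 == 3)).map (fun p => PySem.List.pyGetD vals p.1 0)] := by
  induction cnts generalizing s b0 b1 b2 b3 with
  | nil => simp [PySem.List.enumerate_nil]
  | cons c rest ih =>
    have hcr : ∀ x ∈ rest, -3 ≤ x ∧ x ≤ 4 := fun x hx => hc x (List.mem_cons_of_mem _ hx)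
    have hc0 := hc c (List.mem_cons_self ..)
    rw [PySem.List.enumerate_cons]
    have hcase : c = -3 ∨ c = -2 ∨ c = -1 ∨ c = 0 ∨ c = 1 ∨ c = 2 ∨ c = 3 ∨ c = 4 := by omega
    rcases hcase with h | h | h | h | h | h | h | h <;> subst h
    · rw [List.foldl_cons]; simp only []
      rw [show PySem.List.pySetD [b0,b1,b2,b3] ((-3 : Int) - 1)
            (PySem.List.pyGetD [b0,b1,b2,b3] ((-3:Int) - 1) [] ++ [PySem.List.pyGetD vals s 0])
            = [b0 ++ [PySem.List.pyGetD vals s 0], b1, b2, b3] from rfl]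
      rw [ih _ _ _ _ _ hcr]
      simp [pvKey, PySem.Int.mod]
    · rw [List.foldl_cons]; simp only []
      rw [show PySem.List.pySetD [b0,b1,b2,b3] ((-2 : Int) - 1)
            (PySem.List.pyGetD [b0,b1,b2,b3] ((-2:Int) - 1) [] ++ [PySem.List.pyGetD vals s 0])
            = [b0, b1 ++ [PySem.List.pyGetD vals s 0], b2, b3] from rfl]
      rw [ih _ _ _ _ _ hcr]
      simp [pvKey, PySem.Int.mod]
    · rw [List.foldl_cons]; simp only []
      rw [show PySem.List.pySetD [b0,b1,b2,b3] ((-1 : Int) - 1)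
            (PySem.List.pyGetD [b0,b1,b2,b3] ((-1:Int) - 1) [] ++ [PySem.List.pyGetD vals s 0])
            = [b0, b1, b2 ++ [PySem.List.pyGetD vals s 0], b3] from rfl]
      rw [ih _ _ _ _ _ hcr]
      simp [pvKey, PySem.Int.mod]
    · rw [List.foldl_cons]; simp only []
      rw [show PySem.List.pySetD [b0,b1,b2,b3] ((0 : Int) - 1)
            (PySem.List.pyGetD [b0,b1,b2,b3] ((0:Int) - 1) [] ++ [PySem.List.pyGetD vals s 0])
            = [b0, b1, b2, b3 ++ [PySem.List.pyGetD vals s 0]] from rfl]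
      rw [ih _ _ _ _ _ hcr]
      simp [pvKey, PySem.Int.mod]
    · rw [List.foldl_cons]; simp only []
      rw [show PySem.List.pySetD [b0,b1,b2,b3] ((1 : Int) - 1)
            (PySem.List.pyGetD [b0,b1,b2,b3] ((1:Int) - 1) [] ++ [PySem.List.pyGetD vals s 0])
            = [b0 ++ [PySem.List.pyGetD vals s 0], b1, b2, b3] from rfl]
      rw [ih _ _ _ _ _ hcr]
      simp [pvKey, PySem.Int.mod]
    · rw [List.foldl_cons]; simp only []
      rw [show PySem.List.pySetD [b0,b1,b2,b3] ((2 : Int) - 1)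
            (PySem.List.pyGetD [b0,b1,b2,b3] ((2:Int) - 1) [] ++ [PySem.List.pyGetD vals s 0])
            = [b0, b1 ++ [PySem.List.pyGetD vals s 0], b2, b3] from rfl]
      rw [ih _ _ _ _ _ hcr]
      simp [pvKey, PySem.Int.mod]
    · rw [List.foldl_cons]; simp only []
      rw [show PySem.List.pySetD [b0,b1,b2,b3] ((3 : Int) - 1)
            (PySem.List.pyGetD [b0,b1,b2,b3] ((3:Int) - 1) [] ++ [PySem.List.pyGetD vals s 0])
            = [b0, b1, b2 ++ [PySem.List.pyGetD vals s 0], b3] from rfl]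
      rw [ih _ _ _ _ _ hcr]
      simp [pvKey, PySem.Int.mod]
    · rw [List.foldl_cons]; simp only []
      rw [show PySem.List.pySetD [b0,b1,b2,b3] ((4 : Int) - 1)
            (PySem.List.pyGetD [b0,b1,b2,b3] ((4:Int) - 1) [] ++ [PySem.List.pyGetD vals s 0])
            = [b0, b1, b2, b3 ++ [PySem.List.pyGetD vals s 0]] from rfl]
      rw [ih _ _ _ _ _ hcr]
      simp [pvKey, PySem.Int.mod]

-- A's merge loop: the emptiness test is invisible (re + [] = re), so it is plain concatenation
theorem pv_refold (B0 B1 B2 B3 : List Int) :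
    List.foldl (fun re e => if e ≠ [] then re ++ e else re) ([] : List Int) [B0, B1, B2, B3]
      = B0 ++ B1 ++ B2 ++ B3 := by
  simp only [List.foldl]
  split_ifs <;> simp_all

-- the pairwise order B's descending sort keeps (key k1, ties broken by the index itself)
def pvQ (k1 : Int → Int) (a b : Int) : Prop := k1 b < k1 a ∨ (k1 b = k1 a ∧ b ≤ a)

theorem pv_insertBy_pairwise (k1 : Int → Int) (x : Int) (ys : List Int)
    (h : ys.Pairwise (pvQ k1)) :
    (PySem.List.insertBy
        (fun a b => decide (k1 b < k1 a) || (!decide (k1 a < k1 b) && decide (b < a))) x ys).Pairwise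
      (pvQ k1) := by
  induction ys with
  | nil => simp [PySem.List.insertBy, pvQ]
  | cons y ys ih =>
    rw [List.pairwise_cons] at h
    obtain ⟨hy, hys⟩ := h
    rw [PySem.List.insertBy]
    by_cases hb : (decide (k1 y < k1 x) || (!decide (k1 x < k1 y) && decide (y < x))) = true
    · rw [if_pos hb]
      simp only [Bool.or_eq_true, Bool.and_eq_true, Bool.not_eq_true', decide_eq_true_eq,
        decide_eq_false_iff_not] at hb
      have hQxy : pvQ k1 x y := by unfold pvQ; omega
      refine List.Pairwise.cons ?_ (List.Pairwise.cons hy hys)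
      intro z hz
      rcases List.mem_cons.mp hz with rfl | hz
      · exact hQxy
      · have := hy z hz
        unfold pvQ at *
        omega
    · rw [if_neg hb]
      simp only [Bool.or_eq_true, Bool.and_eq_true, Bool.not_eq_true', decide_eq_true_eq,
        decide_eq_false_iff_not, not_or, not_and] at hb
      refine List.Pairwise.cons ?_ (ih hys)
      intro z hz
      rcases (PySem.List.mem_insertBy _ _ _ _).mp hz with rfl | hz
      · unfold pvQ; omega
      · exact hy z hz

theorem pv_foldl_insertBy_pairwise (k1 : Int → Int) (xs acc : List Int)
    (h : acc.Pairwise (pvQ k1)) :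
    (xs.foldl (fun acc x => PySem.List.insertBy
        (fun a b => decide (k1 b < k1 a) || (!decide (k1 a < k1 b) && decide (b < a))) x acc) acc).Pairwise
      (pvQ k1) := by
  induction xs generalizing acc with
  | nil => exact h
  | cons x xs ih => exact ih _ (pv_insertBy_pairwise k1 x acc h)

-- B's sort named: the unique rearrangement that is strictly decreasing in (k1, index)
theorem pv_sorted2_eq (xs ys : List Int) (k1 : Int → Int)
    (hperm : ys.Perm xs)
    (hpw : ys.Pairwise (fun a b => k1 b < k1 a ∨ (k1 b = k1 a ∧ b < a))) :
    PySem.List.sorted2 xs k1 (fun i => i) true = ys := by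
  unfold PySem.List.sorted2
  have hres : (xs.foldl (fun acc x => PySem.List.insertBy
      (fun a b => decide (k1 b < k1 a) || (!decide (k1 a < k1 b) && decide (b < a))) x acc) []).Pairwise (pvQ k1) :=
    pv_foldl_insertBy_pairwise k1 xs [] (List.Pairwise.nil)
  have hp : (xs.foldl (fun acc x => PySem.List.insertBy
      (fun a b => decide (k1 b < k1 a) || (!decide (k1 a < k1 b) && decide (b < a))) x acc) []).Perm xs := by
    simpa using PySem.List.foldl_insertBy_perm _ xs []
  have hys : ys.Pairwise (pvQ k1) := hpw.imp (by intro a b h; unfold pvQ; omega)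
  refine List.Perm.eq_of_pairwise ?_ hres hys (hp.trans hperm.symm)
  intro a b _ _ hab hba
  unfold pvQ at hab hba
  omega

-- the four bucket filters partition the index range
theorem pv_partition (g : Int → Int) (l : List Int)
    (hg : ∀ i ∈ l, g i = 0 ∨ g i = 1 ∨ g i = 2 ∨ g i = 3) :
    (l.filter (fun i => g i == 3) ++ (l.filter (fun i => g i == 2) ++
      (l.filter (fun i => g i == 1) ++ l.filter (fun i => g i == 0)))).Perm l := by
  induction l with
  | nil => simp
  | cons x l ih =>
    have hx := hg x (List.mem_cons_self ..)
    have ihl := ih (fun i hi => hg i (List.mem_cons_of_mem _ hi))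
    simp only [List.filter_cons]
    rcases hx with h | h | h | h <;>
      simp only [h, Int.reduceBEq, if_true, beq_self_eq_true, List.cons_append]
    · refine List.Perm.trans ?_ (ihl.cons x)
      exact (List.Perm.append_left _ ((List.Perm.append_left _ List.perm_middle))).trans
        ((List.Perm.append_left _ List.perm_middle).trans List.perm_middle)
    · refine List.Perm.trans ?_ (ihl.cons x)
      exact (List.Perm.append_left _ List.perm_middle).trans List.perm_middle
    · exact List.Perm.trans List.perm_middle (ihl.cons x)
    · exact ihl.cons x

-- bucket-3 block first, …, bucket-0 block last, each block in descending index order: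
-- strictly decreasing in (count, index) — PROVIDED bucket order agrees with count order
-- on the indices involved (the content of ¬ D_)
theorem pv_ys_pairwise (g : Int → Int) (n : Int)
    (hk : ∀ a b : Int, a ∈ PySem.List.pyRange 0 n 1 → b ∈ PySem.List.pyRange 0 n 1 →
      (pvKey (g b) < pvKey (g a) → g b < g a) ∧ (pvKey (g b) = pvKey (g a) → g b = g a)) :
    ((((PySem.List.pyRange 0 n 1).filter (fun i => pvKey (g i) == 3)).reverse ++
      (((PySem.List.pyRange 0 n 1).filter (fun i => pvKey (g i) == 2)).reverse ++
       (((PySem.List.pyRange 0 n 1).filter (fun i => pvKey (g i) == 1)).reverse ++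
        ((PySem.List.pyRange 0 n 1).filter (fun i => pvKey (g i) == 0)).reverse)))).Pairwise
      (fun a b => g b < g a ∨ (g b = g a ∧ b < a)) := by
  have hlt : (PySem.List.pyRange 0 n 1).Pairwise (· < ·) := PySem.List.pairwise_lt_pyRange_one 0 n
  have hmem : ∀ (j : Int) (a : Int),
      a ∈ (((PySem.List.pyRange 0 n 1).filter (fun i => pvKey (g i) == j)).reverse) →
        pvKey (g a) = j ∧ a ∈ PySem.List.pyRange 0 n 1 := by
    intro j a ha
    have h := List.mem_filter.mp (List.mem_reverse.mp ha)
    exact ⟨by simpa using h.2, h.1⟩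
  have hblock : ∀ j : Int, (((PySem.List.pyRange 0 n 1).filter (fun i => pvKey (g i) == j)).reverse).Pairwise
      (fun a b => g b < g a ∨ (g b = g a ∧ b < a)) := by
    intro j
    have h1 : (((PySem.List.pyRange 0 n 1).filter (fun i => pvKey (g i) == j)).reverse).Pairwise (fun a b => b < a) :=
      List.pairwise_reverse.mpr (List.Pairwise.filter _ hlt)
    refine h1.imp_of_mem ?_
    intro a b ha hb hlt'
    obtain ⟨hka, hma⟩ := hmem j a ha
    obtain ⟨hkb, hmb⟩ := hmem j b hb
    right
    exact ⟨(hk a b hma hmb).2 (hkb.trans hka.symm), hlt'⟩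
  have hcross : ∀ (j j' : Int), j' < j → ∀ a b : Int,
      a ∈ (((PySem.List.pyRange 0 n 1).filter (fun i => pvKey (g i) == j)).reverse) →
      b ∈ (((PySem.List.pyRange 0 n 1).filter (fun i => pvKey (g i) == j')).reverse) →
      g b < g a ∨ (g b = g a ∧ b < a) := by
    intro j j' hjj a b ha hb
    obtain ⟨hka, hma⟩ := hmem j a ha
    obtain ⟨hkb, hmb⟩ := hmem j' b hb
    left
    exact (hk a b hma hmb).1 (by omega)
  rw [List.pairwise_append]
  refine ⟨hblock 3, ?_, ?_⟩
  · rw [List.pairwise_append]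
    refine ⟨hblock 2, ?_, ?_⟩
    · rw [List.pairwise_append]
      refine ⟨hblock 1, hblock 0, fun a ha b hb => hcross 1 0 (by norm_num) a b ha hb⟩
    · intro a ha b hb
      rcases List.mem_append.mp hb with hb | hb
      · exact hcross 2 1 (by norm_num) a b ha hb
      · exact hcross 2 0 (by norm_num) a b ha hb
  · intro a ha b hb
    rcases List.mem_append.mp hb with hb | hb
    · exact hcross 3 2 (by norm_num) a b ha hb
    rcases List.mem_append.mp hb with hb | hb
    · exact hcross 3 1 (by norm_num) a b ha hb
    · exact hcross 3 0 (by norm_num) a b ha hb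

theorem pv_getD_mem_of_range (cnts : List Int) (i : Int)
    (hi : i ∈ PySem.List.pyRange 0 (PySem.List.len cnts) 1) :
    PySem.List.pyGetD cnts i 0 ∈ cnts := by
  rw [PySem.List.mem_pyRange_one] at hi
  apply PySem.List.pyGetD_mem
  simp only [PySem.List.len] at hi
  constructor <;> omega

theorem pv_key_cases (g : Int → Int) (cnts : List Int)
    (hgdef : ∀ i, g i = pvKey (PySem.List.pyGetD cnts i 0)) :
    ∀ i ∈ PySem.List.pyRange 0 (PySem.List.len cnts) 1, g i = 0 ∨ g i = 1 ∨ g i = 2 ∨ g i = 3 := by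
  intro i _
  rw [hgdef i]
  unfold pvKey
  have h1 := PySem.Int.mod_nonneg (PySem.List.pyGetD cnts i 0 - 1) (by norm_num : (0:Int) < 4)
  have h2 := PySem.Int.mod_lt (PySem.List.pyGetD cnts i 0 - 1) (by norm_num : (0:Int) < 4)
  omega

-- outside D_ the bucket order IS the count order
theorem pv_key_agrees (cnts : List Int) (hc : ∀ c ∈ cnts, -3 ≤ c ∧ c ≤ 4)
    (hnd : ∀ c ∈ cnts, ∀ c' ∈ cnts, ¬ (1 ≤ c ∧ c' ≤ 0 ∧ c ≤ c' + 4)) :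
    ∀ a b : Int, a ∈ PySem.List.pyRange 0 (PySem.List.len cnts) 1 →
      b ∈ PySem.List.pyRange 0 (PySem.List.len cnts) 1 →
      (pvKey (PySem.List.pyGetD cnts b 0) < pvKey (PySem.List.pyGetD cnts a 0) →
        PySem.List.pyGetD cnts b 0 < PySem.List.pyGetD cnts a 0) ∧
      (pvKey (PySem.List.pyGetD cnts b 0) = pvKey (PySem.List.pyGetD cnts a 0) →
        PySem.List.pyGetD cnts b 0 = PySem.List.pyGetD cnts a 0) := by
  intro a b ha hb
  have hma := pv_getD_mem_of_range cnts a ha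
  have hmb := pv_getD_mem_of_range cnts b hb
  set x := PySem.List.pyGetD cnts a 0 with hx
  set y := PySem.List.pyGetD cnts b 0 with hy
  have hbx := hc x hma
  have hby := hc y hmb
  have hnd1 := hnd x hma y hmb
  have hnd2 := hnd y hmb x hma
  -- pvKey c = c - 1 for 1 ≤ c ≤ 4, c + 3 for -3 ≤ c ≤ 0
  have hkx : pvKey x = if 1 ≤ x then x - 1 else x + 3 := by
    unfold pvKey
    rcases (by omega : x = -3 ∨ x = -2 ∨ x = -1 ∨ x = 0 ∨ x = 1 ∨ x = 2 ∨ x = 3 ∨ x = 4)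
      with h | h | h | h | h | h | h | h <;> rw [h] <;> simp [PySem.Int.mod]
  have hky : pvKey y = if 1 ≤ y then y - 1 else y + 3 := by
    unfold pvKey
    rcases (by omega : y = -3 ∨ y = -2 ∨ y = -1 ∨ y = 0 ∨ y = 1 ∨ y = 2 ∨ y = 3 ∨ y = 4)
      with h | h | h | h | h | h | h | h <;> rw [h] <;> simp [PySem.Int.mod]
  rw [hkx, hky]
  split_ifs <;> omega

-- ===== VERDICT (by name: the statement is the Claim_ definition above) =====
theorem sortForcompare_py_spec : Claim_equal_sortForcompare_py := by
  unfold Claim_equal_sortForcompare_py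
  intro count_rst _ hpre
  unfold Spec_sortForcompare_py
  obtain ⟨hlen, _hle, hc, hnD⟩ := hpre
  match count_rst, hlen with
  | vals :: cnts :: rest, _ =>
  simp only [List.getD_cons_succ, List.getD_cons_zero] at hc hnD
  push Not at hnD
  have hA0 : PySem.List.pyGet? (vals :: cnts :: rest) 0 = some vals := PySem.List.pyGet?_zero_cons ..
  have hA1 : PySem.List.pyGet? (vals :: cnts :: rest) 1 = some cnts := by
    rw [show (1:Int) = ((1:Nat):Int) from rfl, PySem.List.pyGet?_natCast]; rfl
  simp only [sortForcompare_py, sortForcompare_py_alt, hA0, hA1, Option.getD_some]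
  rw [pv_buckets vals cnts 0 [] [] [] [] hc, pv_refold]
  rw [pv_sorted2_eq _
      ((((PySem.List.pyRange 0 (PySem.List.len cnts) 1).filter (fun i => pvKey (PySem.List.pyGetD cnts i 0) == 3)).reverse ++
        (((PySem.List.pyRange 0 (PySem.List.len cnts) 1).filter (fun i => pvKey (PySem.List.pyGetD cnts i 0) == 2)).reverse ++
         (((PySem.List.pyRange 0 (PySem.List.len cnts) 1).filter (fun i => pvKey (PySem.List.pyGetD cnts i 0) == 1)).reverse ++
          ((PySem.List.pyRange 0 (PySem.List.len cnts) 1).filter (fun i => pvKey (PySem.List.pyGetD cnts i 0) == 0)).reverse))))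
      _ ?_ ?_]
  · rw [PySem.List.enumerate_eq_map_pyRange cnts 0]
    simp [List.filter_map, Function.comp_def, List.map_map, List.map_reverse, List.reverse_append,
      List.append_assoc]
  · refine List.Perm.trans ?_ (pv_partition (fun i => pvKey (PySem.List.pyGetD cnts i 0))
      (PySem.List.pyRange 0 (PySem.List.len cnts) 1)
      (pv_key_cases _ cnts (fun i => rfl)))
    exact List.Perm.append (List.reverse_perm _)
      (List.Perm.append (List.reverse_perm _)
        (List.Perm.append (List.reverse_perm _) (List.reverse_perm _)))
  · exact pv_ys_pairwise (fun i => PySem.List.pyGetD cnts i 0) (PySem.List.len cnts)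
      (pv_key_agrees cnts hc (fun c hcm c' hcm' hcon =>
        absurd hcon.2.2 (by have := hnD c hcm c' hcm' hcon.1 hcon.2.1; omega)))
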